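-- pv_equiv track=rewrite | github.com/tombrossard0/Nonogramme-Solver | main.py | CheckIndivPossRow
-- ===== SOURCE A (Python) =====
-- def CheckIndivPossRow(input_, row):
--     res = []
--
--     i = 0
--     j = input_
--     while j <= len(row):
--         subRow = row[i:j]
--         if not 0 in subRow:
--             for k in range(len(subRow)):
--                 subRow[k] = 1
--             row_ = []
--             for k in range(len(row)):
--                 row_.append(row[k])
--                 if row_[k] == -1:
--                     row_[k] = 0
--             new_poss = row_[0:i] + subRow
--             res.append(new_poss)
--         i+=1
--         j+=1
--     return res
-- ===== SOURCE B (Python) =====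
-- def CheckIndivPossRow(input_, row):
--     n = len(row)
--     fixed = [0 if x == -1 else x for x in row]
--     pz = [0]
--     for x in row:
--         pz.append(pz[-1] + (x == 0))
--     res = []
--     for i in range(n - input_ + 1):
--         if pz[i + input_] == pz[i]:
--             res.append(fixed[:i] + [1] * input_)
--     return res
-- ===== Notes on version B (the rewrite author's own statement) =====
-- stated objective: faster
-- what changed: B builds the -1->0 fixed row once and a prefix table of zero counts, then emits fixed[:i]+[1]*input_ for each window whose two table entries agree, instead of A's per-window membership scan, per-window rebuild of the whole fixed row and element-by-element overwrite; Pre_ excludes negative input_ (a nonsensical negative block length), where A's output is an artefact of Python negative-slice wraparound and B raises IndexError.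
-- outside the precondition, e.g. on CheckIndivPossRow(-1, [1, 0]): A returns [[1], [1], [1, 0], [1, 0]], B raises IndexError
import Mathlib
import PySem

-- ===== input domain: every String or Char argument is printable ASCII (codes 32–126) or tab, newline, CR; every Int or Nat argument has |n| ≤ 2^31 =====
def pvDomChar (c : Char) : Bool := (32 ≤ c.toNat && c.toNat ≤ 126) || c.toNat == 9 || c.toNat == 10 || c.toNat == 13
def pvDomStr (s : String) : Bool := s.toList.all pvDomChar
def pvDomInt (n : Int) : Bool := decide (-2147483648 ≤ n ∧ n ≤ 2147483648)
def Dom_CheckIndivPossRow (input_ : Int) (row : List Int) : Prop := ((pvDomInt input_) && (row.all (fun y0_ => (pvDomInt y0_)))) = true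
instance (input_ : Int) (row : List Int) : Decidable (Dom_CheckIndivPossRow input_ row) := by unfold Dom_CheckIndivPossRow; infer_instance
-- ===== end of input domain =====

-- B hoists the invariant fixed-row rebuild out of the window loop and replaces the per-window zero
-- scan and element-writing loop by a precomputed zero-prefix-count table and a replicate; Pre_
-- excludes negative input_ (negative block length), where A's value comes from slice wraparound
-- and B raises IndexError.


-- ===== PORT A =====
-- for k in range(len(row)): row_.append(row[k]); if row_[k] == -1: row_[k] = 0
def pvBuildRow_ (row : List Int) : List Int :=
  (PySem.List.pyRange 0 (row.length : Int) 1).foldl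
    (fun row_ k =>
      let row_ := row_ ++ [PySem.List.pyGetD row k 0]
      if PySem.List.pyGetD row_ k 0 = -1 then PySem.List.pySetD row_ k 0 else row_) []

-- for k in range(len(subRow)): subRow[k] = 1
def pvOnes (subRow : List Int) : List Int :=
  (PySem.List.pyRange 0 (subRow.length : Int) 1).foldl
    (fun s k => PySem.List.pySetD s k 1) subRow

-- while j <= len(row): …
def pvLoopA (row : List Int) (i j : Int) (res : List (List Int)) : List (List Int) :=
  if h : j ≤ (row.length : Int) then
    let subRow := PySem.List.slice row (some i) (some j)
    let res' :=
      if ¬ ((0 : Int) ∈ subRow) then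
        res ++ [PySem.List.slice (pvBuildRow_ row) (some 0) (some i) ++ pvOnes subRow]
      else res
    pvLoopA row (i + 1) (j + 1) res'
  else res
termination_by ((row.length : Int) + 1 - j).toNat
decreasing_by omega

def CheckIndivPossRow (input_ : Int) (row : List Int) : List (List Int) :=
  pvLoopA row 0 input_ []

-- ===== PORT B =====
-- fixed = [0 if x == -1 else x for x in row]
def pvRowFixed (row : List Int) : List Int := row.map (fun x => if x = -1 then 0 else x)

-- pz = [0]; for x in row: pz.append(pz[-1] + (x == 0))
def pvPz (row : List Int) : List Int :=
  row.foldl (fun pz x => pz ++ [PySem.List.pyGetD pz (-1) 0 + (if x = 0 then 1 else 0)]) [0]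

def CheckIndivPossRow_alt (input_ : Int) (row : List Int) : List (List Int) :=
  let n : Int := (row.length : Int)
  let fixed := pvRowFixed row
  let pz := pvPz row
  (PySem.List.pyRange 0 (n - input_ + 1) 1).foldl
    (fun res i =>
      if PySem.List.pyGetD pz (i + input_) 0 = PySem.List.pyGetD pz i 0 then
        res ++ [PySem.List.slice fixed none (some i) ++ PySem.List.pyRepeat [1] input_]
      else res) []

-- ===== PRECONDITION & SPEC =====
-- Pre_ excludes negative input_ (a nonsensical negative block length), a corner where A's returned
-- value is an artefact of Python negative-slice wraparound and B raises IndexError.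
def Pre_CheckIndivPossRow (input_ : Int) (row : List Int) : Prop := 0 ≤ input_
instance (input_ : Int) (row : List Int) : Decidable (Pre_CheckIndivPossRow input_ row) := by unfold Pre_CheckIndivPossRow; infer_instance
def pvWitness_CheckIndivPossRow : Int × List Int := (2, [1, -1, 0, 1])

def Spec_CheckIndivPossRow (input_ : Int) (row : List Int) (out : List (List Int)) : Prop := out = CheckIndivPossRow_alt input_ row
instance (input_ : Int) (row : List Int) (out : List (List Int)) : Decidable (Spec_CheckIndivPossRow input_ row out) := by unfold Spec_CheckIndivPossRow; infer_instance

-- ===== CLAIM (what is proved, stated in full; the proofs are below) =====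
def Claim_equal_CheckIndivPossRow : Prop := ∀ (input_ : Int) (row : List Int), Dom_CheckIndivPossRow input_ row → Pre_CheckIndivPossRow input_ row → Spec_CheckIndivPossRow input_ row (CheckIndivPossRow input_ row)

-- ===== LEMMAS AND PROOFS =====

-- A rebuilds row_ each iteration; it is always the element-wise fixup B computes once.
lemma pvBuildRow_eq (row : List Int) : pvBuildRow_ row = pvRowFixed row := by
  unfold pvBuildRow_ pvRowFixed
  rw [PySem.List.pyRange_zero_nat, List.foldl_map]
  suffices h : ∀ m, m ≤ row.length → (List.range m).foldl
      (fun row_ (k : Nat) =>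
        let row_ := row_ ++ [PySem.List.pyGetD row (k : Int) 0]
        if PySem.List.pyGetD row_ (k : Int) 0 = -1 then PySem.List.pySetD row_ (k : Int) 0 else row_) []
      = (row.take m).map (fun x => if x = -1 then 0 else x) by
    simpa using h row.length le_rfl
  intro m
  induction m with
  | zero => simp
  | succ m ih =>
    intro hm
    have hm' : m < row.length := by omega
    rw [List.range_succ, List.foldl_append, ih (by omega)]
    simp only [List.foldl_cons, List.foldl_nil]
    have hlen : ((row.take m).map (fun x => if x = -1 then 0 else x)).length = m := by
      simp [Nat.min_eq_left (le_of_lt hm')]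
    simp only [PySem.List.pyGetD_natCast, PySem.List.pySetD_natCast]
    rw [List.take_add_one, List.getElem?_eq_getElem hm']
    simp only [Option.toList_some, List.map_append, List.map_cons, List.map_nil]
    have hgd : row.getD m 0 = row[m] := List.getD_eq_getElem row 0 hm'
    rw [hgd]
    have h1 : ((row.take m).map (fun x : Int => if x = -1 then 0 else x) ++ [row[m]]).getD m 0 = row[m] := by
      rw [List.getD_eq_getElem?_getD, List.getElem?_append_right (by omega)]
      rw [hlen, Nat.sub_self]
      simp
    have h2 : ((row.take m).map (fun x : Int => if x = -1 then 0 else x) ++ [row[m]]).set m 0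
        = (row.take m).map (fun x : Int => if x = -1 then 0 else x) ++ [0] := by
      rw [List.set_append]
      rw [if_neg (by omega), hlen, Nat.sub_self]
      simp
    by_cases hx : row[m] = -1
    · rw [if_pos (by rw [h1, hx]), h2]
      simp [hx]
    · rw [if_neg (by rw [h1]; exact hx)]
      simp [hx]

-- A's in-place all-ones loop is a replicate.
lemma pvOnes_eq (xs : List Int) : pvOnes xs = List.replicate xs.length 1 := by
  unfold pvOnes
  rw [PySem.List.pyRange_zero_nat, List.foldl_map]
  suffices h : ∀ m, m ≤ xs.length → (List.range m).foldl
      (fun s (k : Nat) => PySem.List.pySetD s (k : Int) 1) xs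
      = List.replicate m 1 ++ xs.drop m by
    simpa using h xs.length le_rfl
  intro m
  induction m with
  | zero => simp
  | succ m ih =>
    intro hm
    have hm' : m < xs.length := by omega
    rw [List.range_succ, List.foldl_append, ih (by omega)]
    simp only [List.foldl_cons, List.foldl_nil, PySem.List.pySetD_natCast]
    rw [List.set_append, if_neg (by simp)]
    rw [List.drop_eq_getElem_cons hm']
    rw [List.replicate_succ']
    simp
    rw [List.drop_eq_getElem_cons hm']
    rfl

-- B's prefix table holds the zero counts of the prefixes of row.
lemma pvPz_eq (row : List Int) :
    pvPz row = (List.range (row.length + 1)).map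
      (fun k => (List.count (0 : Int) (row.take k) : Int)) := by
  unfold pvPz
  induction row using List.reverseRecOn with
  | nil => simp
  | append_singleton ys y ih =>
    rw [List.foldl_append, ih]
    simp only [List.foldl_cons, List.foldl_nil, List.length_append, List.length_singleton]
    have hlast : PySem.List.pyGetD ((List.range (ys.length + 1)).map
        (fun k => (List.count (0:Int) (ys.take k) : Int))) (-1) 0 = (List.count (0:Int) ys : Int) := by
      rw [List.range_succ, List.map_append, List.map_cons, List.map_nil,
        PySem.List.pyGetD_neg_one_append_singleton]
      simp
    rw [hlast]
    rw [List.range_succ (n := ys.length + 1), List.map_append, List.map_cons, List.map_nil]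
    congr 1
    · apply List.map_congr_left
      intro k hk
      rw [List.mem_range] at hk
      rw [List.take_append_of_le_length (by omega)]
    · congr 1
      rw [List.take_of_length_le (by simp)]
      rw [List.count_append]
      by_cases hy : y = 0 <;> simp [hy]

-- one iteration of A's while loop = one iteration of B's for loop (input_ ≥ 0, window in range)
lemma pvStep_eq (input_ : Int) (row : List Int) (i : Int) (res : List (List Int))
    (hinp : 0 ≤ input_) (hi : 0 ≤ i) (hj : i + input_ ≤ (row.length : Int)) :
    (if ¬ ((0 : Int) ∈ PySem.List.slice row (some i) (some (i + input_))) then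
        res ++ [PySem.List.slice (pvBuildRow_ row) (some 0) (some i) ++
                pvOnes (PySem.List.slice row (some i) (some (i + input_)))]
      else res)
      = (if PySem.List.pyGetD (pvPz row) (i + input_) 0 = PySem.List.pyGetD (pvPz row) i 0 then
          res ++ [PySem.List.slice (pvRowFixed row) none (some i) ++ PySem.List.pyRepeat [1] input_]
        else res) := by
  have hslice : PySem.List.slice row (some i) (some (i + input_))
      = (row.drop i.toNat).take ((i + input_).toNat - i.toNat) := by
    exact PySem.List.slice_of_nonneg row hi (by omega) (by omega) (by omega)
  have hpz : ∀ (k : Nat), k ≤ row.length → PySem.List.pyGetD (pvPz row) (k : Int) 0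
      = (List.count (0 : Int) (row.take k) : Int) := by
    intro k hk
    rw [pvPz_eq, PySem.List.pyGetD_natCast]
    rw [List.getD_eq_getElem?_getD, List.getElem?_map, List.getElem?_range (by omega)]
    simp
  have hpzj : PySem.List.pyGetD (pvPz row) (i + input_) 0
      = (List.count (0 : Int) (row.take (i + input_).toNat) : Int) := by
    have h := hpz (i + input_).toNat (by omega)
    rwa [show (((i + input_).toNat : Int)) = i + input_ by omega] at h
  have hpzi : PySem.List.pyGetD (pvPz row) i 0
      = (List.count (0 : Int) (row.take i.toNat) : Int) := by
    have h := hpz i.toNat (by omega)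
    rwa [show ((i.toNat : Int)) = i by omega] at h
  rw [hpzj, hpzi]
  rw [hslice, pvBuildRow_eq, pvOnes_eq]
  have hsublen : ((row.drop i.toNat).take ((i + input_).toNat - i.toNat)).length
      = (i + input_).toNat - i.toNat := by
    simp; omega
  rw [hsublen]
  have hrep : PySem.List.pyRepeat [(1:Int)] input_
      = List.replicate ((i + input_).toNat - i.toNat) 1 := by
    rw [PySem.List.pyRepeat_singleton]
    congr 1
    omega
  rw [hrep]
  have hcount : (List.count (0:Int) (row.take (i + input_).toNat) : Int)
      = (List.count (0:Int) (row.take i.toNat) : Int)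
        + (List.count (0:Int) ((row.drop i.toNat).take ((i + input_).toNat - i.toNat)) : Int) := by
    have h := List.take_add (l := row) (i := i.toNat) (j := (i + input_).toNat - i.toNat)
    rw [Nat.add_sub_cancel' (by omega)] at h
    rw [h, List.count_append]
    push_cast
    ring
  by_cases hmem : (0 : Int) ∈ (row.drop i.toNat).take ((i + input_).toNat - i.toNat)
  · rw [if_neg (by simpa using hmem)]
    rw [if_neg (by
      intro h
      rw [hcount] at h
      have h3 : List.count (0:Int) ((row.drop i.toNat).take ((i + input_).toNat - i.toNat)) = 0 := by
        omega
      exact (List.count_eq_zero.mp h3) hmem)]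
  · rw [if_pos (by simpa using hmem)]
    rw [if_pos (by
      rw [hcount]
      have h3 : List.count (0:Int) ((row.drop i.toNat).take ((i + input_).toNat - i.toNat)) = 0 :=
        List.count_eq_zero.mpr hmem
      omega)]
    rw [PySem.List.slice_zero_start]

-- the whole loops agree, from any start index i ≥ 0
lemma pvLoop_eq (input_ : Int) (row : List Int) (hinp : 0 ≤ input_) :
    ∀ (fuel : Nat) (i : Int) (res : List (List Int)), 0 ≤ i →
      (((row.length : Int) + 1 - (i + input_)).toNat ≤ fuel) →
      pvLoopA row i (i + input_) res =
        (PySem.List.pyRange i ((row.length : Int) - input_ + 1) 1).foldl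
          (fun res i =>
            if PySem.List.pyGetD (pvPz row) (i + input_) 0 = PySem.List.pyGetD (pvPz row) i 0 then
              res ++ [PySem.List.slice (pvRowFixed row) none (some i) ++ PySem.List.pyRepeat [1] input_]
            else res) res := by
  intro fuel
  induction fuel with
  | zero =>
    intro i res hi hf
    rw [pvLoopA, dif_neg (by omega), PySem.List.pyRange_one_eq_nil (by omega)]
    rfl
  | succ fuel ih =>
    intro i res hi hf
    by_cases hj : i + input_ ≤ (row.length : Int)
    · rw [pvLoopA, dif_pos hj]
      rw [PySem.List.pyRange_one_cons (by omega)]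
      simp only [List.foldl_cons]
      rw [pvStep_eq input_ row i res hinp hi hj]
      have h2 := ih (i + 1)
        (if PySem.List.pyGetD (pvPz row) (i + input_) 0 = PySem.List.pyGetD (pvPz row) i 0 then
          res ++ [PySem.List.slice (pvRowFixed row) none (some i) ++ PySem.List.pyRepeat [1] input_]
         else res) (by omega) (by omega)
      rw [show i + input_ + 1 = i + 1 + input_ by ring]
      exact h2
    · rw [pvLoopA, dif_neg hj, PySem.List.pyRange_one_eq_nil (by omega)]
      rfl

-- ===== VERDICT (by name: the statement is the Claim_ definition above) =====
theorem CheckIndivPossRow_spec : Claim_equal_CheckIndivPossRow := by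
  intro input_ row _ hpre
  unfold Spec_CheckIndivPossRow CheckIndivPossRow CheckIndivPossRow_alt
  have h := pvLoop_eq input_ row hpre (((row.length : Int) + 1 - input_).toNat) 0 [] le_rfl (by omega)
  simpa using h
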